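-- pv_equiv track=rewrite | github.com/gingerzoealex/berlin | berlin/commands.py | _parse_to_components
-- ===== SOURCE A (Python) =====
-- def _parse_to_components(args):
--     components = {'name': []}
--     this_component = 'name'
--     for arg in args:
--         if arg and arg[0] == '[' and arg[-1] == ']':
--             this_component = arg[1:-1]
--             components[this_component] = []
--         else:
--             components[this_component].append(arg)
--
--     return {k: ' '.join(v) for k, v in components.items()}
-- ===== SOURCE B (Python) =====
-- def _parse_to_components(args):
--     def _is_header(a):
--         return bool(a) and a[0] == '[' and a[-1] == ']'
--
--     res = {}
--     name = 'name'
--     rest = list(args)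
--     while True:
--         i = 0
--         while i < len(rest) and not _is_header(rest[i]):
--             i += 1
--         res[name] = ' '.join(rest[:i])
--         if i == len(rest):
--             return res
--         name = rest[i][1:-1]
--         rest = rest[i + 1:]
-- ===== Notes on version B (the rewrite author's own statement) =====
-- stated objective: alternative
-- what changed: Replaces A's token-by-token bucketing into dict-of-lists (append to the current component, join everything at the end) with a segment-splitting loop: find the next header, slice out the whole segment, join it once and assign the string directly, then continue after the header.
import Mathlib
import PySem

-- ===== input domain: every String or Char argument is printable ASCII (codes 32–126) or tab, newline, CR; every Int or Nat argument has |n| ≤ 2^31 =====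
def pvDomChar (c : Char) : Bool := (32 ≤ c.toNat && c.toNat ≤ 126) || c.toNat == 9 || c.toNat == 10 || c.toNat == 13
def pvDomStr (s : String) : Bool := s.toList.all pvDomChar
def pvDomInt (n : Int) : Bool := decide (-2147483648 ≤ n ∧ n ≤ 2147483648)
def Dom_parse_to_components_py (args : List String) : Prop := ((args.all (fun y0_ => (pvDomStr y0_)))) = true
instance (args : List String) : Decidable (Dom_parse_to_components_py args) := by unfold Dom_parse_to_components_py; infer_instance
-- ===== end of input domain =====

-- B replaces A's token-by-token bucketing into a dict of lists with a segment-splitting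
-- loop (find next header, slice the segment, join and assign it at once); alternative
-- decomposition, same cost.

-- ===== PORT A =====
-- header test: `arg and arg[0] == '[' and arg[-1] == ']'`
def pvIsHeaderA (arg : String) : Bool :=
  (!(arg == "")) && (PySem.Str.pyGet? arg 0 == some '[') && (PySem.Str.pyGet? arg (-1) == some ']')

-- one iteration of A's for-loop; state = (components, this_component)
def pvStepA (st : PySem.Dict String (List String) × String) (arg : String) :
    PySem.Dict String (List String) × String :=
  if pvIsHeaderA arg then
    let name := PySem.Str.slice arg (some 1) (some (-1))
    (st.1.insert name [], name)
  else
    (st.1.modify st.2 [] (fun v => v ++ [arg]), st.2)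

def parse_to_components_py (args : List String) : List (String × String) :=
  let st := args.foldl pvStepA ((PySem.Dict.empty.insert "name" ([] : List String)), "name")
  -- `{k: ' '.join(v) for k, v in components.items()}`
  ((st.1.items.foldl (fun r p => r.insert p.1 (PySem.Str.join " " p.2))
      (PySem.Dict.empty : PySem.Dict String String))).items

-- ===== PORT B =====
def pvIsHeaderB (arg : String) : Bool :=
  (!(arg == "")) && (PySem.Str.pyGet? arg 0 == some '[') && (PySem.Str.pyGet? arg (-1) == some ']')

-- the inner `while i < len(rest) and not _is_header(rest[i])` counter
def pvHdrIdxB : List String → Nat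
  | [] => 0
  | a :: t => if pvIsHeaderB a then 0 else pvHdrIdxB t + 1

theorem pvHdrIdxB_le (rest : List String) : pvHdrIdxB rest ≤ rest.length := by
  induction rest with
  | nil => simp [pvHdrIdxB]
  | cons a t ih => simp only [pvHdrIdxB, List.length_cons]; split <;> omega

-- the outer `while True` loop of B
def pvGoB (name : String) (rest : List String) (res : PySem.Dict String String) :
    PySem.Dict String String :=
  let i := pvHdrIdxB rest
  let res' := res.insert name (PySem.Str.join " " (rest.take i))
  if _h : i = rest.length then res'
  else
    pvGoB (PySem.Str.slice (rest.getD i "") (some 1) (some (-1))) (rest.drop (i + 1)) res'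
termination_by rest.length
decreasing_by
  have := pvHdrIdxB_le rest
  simp only [List.length_drop]
  omega

def parse_to_components_py_alt (args : List String) : List (String × String) :=
  (pvGoB "name" args (PySem.Dict.empty : PySem.Dict String String)).items

-- ===== PRECONDITION & SPEC =====
def Spec_parse_to_components_py (args : List String) (out : List (String × String)) : Prop := out = parse_to_components_py_alt args
instance (args : List String) (out : List (String × String)) : Decidable (Spec_parse_to_components_py args out) := by unfold Spec_parse_to_components_py; infer_instance

-- ===== CLAIM (what is proved, stated in full; the proofs are below) =====
def Claim_equal_parse_to_components_py : Prop := ∀ (args : List String), Dom_parse_to_components_py args → Spec_parse_to_components_py args (parse_to_components_py args)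

-- ===== LEMMAS AND PROOFS =====

-- the two header predicates are definitionally the same test
theorem pvIsHeaderB_eq (arg : String) : pvIsHeaderB arg = pvIsHeaderA arg := rfl

-- A's final dict comprehension, as a map over the items
def pvMapJoin (d : PySem.Dict String (List String)) : PySem.Dict String String :=
  PySem.Dict.mk (d.items.map (fun p => (p.1, PySem.Str.join " " p.2)))

theorem pvMapJoin_contains (d : PySem.Dict String (List String)) (k : String) :
    (pvMapJoin d).contains k = d.contains k := by
  simp [pvMapJoin, PySem.Dict.contains, List.any_map, Function.comp_def]

theorem pvMapJoin_insert (d : PySem.Dict String (List String)) (k : String) (v : List String) :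
    pvMapJoin (d.insert k v) = (pvMapJoin d).insert k (PySem.Str.join " " v) := by
  have hc2 : (PySem.Dict.mk (List.map (fun p => (p.1, PySem.Str.join " " p.2)) d.items)).contains k
      = d.contains k := pvMapJoin_contains d k
  by_cases h : d.contains k = true
  · simp only [pvMapJoin, PySem.Dict.insert, hc2, h, if_true, List.map_map]
    congr 1
    apply List.map_congr_left
    intro p _
    by_cases hp : p.1 = k <;> simp [hp]
  · simp only [pvMapJoin, PySem.Dict.insert, hc2, eq_false_of_ne_true h, Bool.false_eq_true,
      if_false, List.map_append, List.map_cons, List.map_nil]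

-- A's loop over a run of non-header tokens just extends the current bucket
theorem pvFoldSeg (seg : List String) (hseg : ∀ a ∈ seg, pvIsHeaderA a = false) :
    ∀ (d : PySem.Dict String (List String)) (name : String) (l : List String),
      List.foldl pvStepA (d.insert name l, name) seg = (d.insert name (l ++ seg), name) := by
  induction seg with
  | nil => intro d name l; simp
  | cons a t ih =>
    intro d name l
    have ha : pvIsHeaderA a = false := hseg a (List.mem_cons_self ..)
    have ht : ∀ x ∈ t, pvIsHeaderA x = false := fun x hx => hseg x (List.mem_cons_of_mem _ hx)
    simp only [List.foldl_cons, pvStepA, ha, Bool.false_eq_true, if_false, PySem.Dict.modify,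
      PySem.Dict.getD_insert_self, PySem.Dict.insert_insert_self]
    rw [ih ht d name (l ++ [a])]
    simp

theorem pvHdrIdxB_take (rest : List String) :
    ∀ a ∈ rest.take (pvHdrIdxB rest), pvIsHeaderA a = false := by
  induction rest with
  | nil => simp
  | cons x t ih =>
    by_cases hx : pvIsHeaderB x = true
    · simp [pvHdrIdxB, hx]
    · have hx' : pvIsHeaderB x = false := eq_false_of_ne_true hx
      simp only [pvHdrIdxB, hx', Bool.false_eq_true, if_false, List.take_succ_cons]
      intro a ha
      rcases List.mem_cons.mp ha with rfl | ha'
      · rw [← pvIsHeaderB_eq]; exact hx'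
      · exact ih a ha'

theorem pvHdrIdxB_drop (rest : List String) (h : pvHdrIdxB rest ≠ rest.length) :
    rest.drop (pvHdrIdxB rest) = rest.getD (pvHdrIdxB rest) "" :: rest.drop (pvHdrIdxB rest + 1)
    ∧ pvIsHeaderA (rest.getD (pvHdrIdxB rest) "") = true := by
  induction rest with
  | nil => simp [pvHdrIdxB] at h
  | cons x t ih =>
    by_cases hx : pvIsHeaderB x = true
    · simp [pvHdrIdxB, hx, ← pvIsHeaderB_eq]
    · have hx' : pvIsHeaderB x = false := eq_false_of_ne_true hx
      have h' : pvHdrIdxB t ≠ t.length := by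
        simp only [pvHdrIdxB, hx', Bool.false_eq_true, if_false, List.length_cons] at h; omega
      simpa [pvHdrIdxB, hx'] using ih h'

-- keys stay unique through A's loop
theorem pvFoldNodup (args : List String) :
    ∀ st : PySem.Dict String (List String) × String, st.1.keys.Nodup →
      (List.foldl pvStepA st args).1.keys.Nodup := by
  induction args with
  | nil => intro st h; simpa using h
  | cons a t ih =>
    intro st h
    simp only [List.foldl_cons]
    apply ih
    unfold pvStepA
    split
    · exact PySem.Dict.nodup_keys_insert _ _ _ h
    · exact PySem.Dict.nodup_keys_insert _ _ _ h

-- main invariant: A's loop from a fresh current bucket, joined, is B's segment loop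
theorem pvMain (n : Nat) :
    ∀ (rest : List String), rest.length ≤ n →
      ∀ (name : String) (d : PySem.Dict String (List String)),
        pvMapJoin (List.foldl pvStepA (d.insert name [], name) rest).1
          = pvGoB name rest (pvMapJoin d) := by
  induction n with
  | zero =>
    intro rest hlen name d
    have : rest = [] := List.eq_nil_of_length_eq_zero (by omega)
    subst this
    rw [pvGoB]
    simp [pvHdrIdxB, pvMapJoin_insert]
  | succ n ih =>
    intro rest hlen name d
    set i := pvHdrIdxB rest with hi
    have hle := pvHdrIdxB_le rest
    have hsplit : rest = rest.take i ++ rest.drop i := (List.take_append_drop i rest).symm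
    rw [pvGoB]
    by_cases h : i = rest.length
    · have hdrop : rest.drop i = [] := by rw [h]; exact List.drop_length
      conv_lhs => rw [hsplit, hdrop, List.append_nil]
      rw [pvFoldSeg _ (pvHdrIdxB_take rest) d name []]
      simp only [List.nil_append, pvMapJoin_insert]
      rw [dif_pos (by rw [← hi]; exact h)]
    · obtain ⟨hdrop, hhdr⟩ := pvHdrIdxB_drop rest (by rw [← hi] at *; exact h)
      simp only [List.getD_eq_getElem?_getD] at hdrop hhdr
      rw [dif_neg (by rw [← hi]; exact h)]
      simp only [List.getD_eq_getElem?_getD]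
      conv_lhs => rw [hsplit, hdrop]
      rw [List.foldl_append, pvFoldSeg _ (pvHdrIdxB_take rest) d name []]
      simp only [List.nil_append, List.foldl_cons]
      rw [show pvStepA (d.insert name (rest.take i), name) (rest[i]?.getD "")
            = ((d.insert name (rest.take i)).insert
                (PySem.Str.slice (rest[i]?.getD "") (some 1) (some (-1))) [],
               PySem.Str.slice (rest[i]?.getD "") (some 1) (some (-1))) by
        simp only [pvStepA]
        rw [if_pos (by rw [hi] at *; exact hhdr)]]
      have hlen' : (rest.drop (i + 1)).length ≤ n := by
        simp only [List.length_drop]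
        have : i < rest.length := lt_of_le_of_ne hle h
        omega
      rw [ih _ hlen' _ (d.insert name (rest.take i)), pvMapJoin_insert]

-- the comprehension fold is pvMapJoin (keys of A's dict are unique)
theorem pvComprehension (d : PySem.Dict String (List String)) (hnd : d.keys.Nodup) :
    (d.items.foldl (fun r p => r.insert p.1 (PySem.Str.join " " p.2))
        (PySem.Dict.empty : PySem.Dict String String)).items
      = (pvMapJoin d).items := by
  have := PySem.Dict.items_foldl_insert_fresh (l := d.items) (k := Prod.fst)
    (v := fun p => PySem.Str.join " " p.2) (d := (PySem.Dict.empty : PySem.Dict String String))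
    (fun a _ => PySem.Dict.contains_empty _) (by simpa [PySem.Dict.keys] using hnd)
  simpa [pvMapJoin, PySem.Dict.empty] using this

-- ===== VERDICT (by name: the statement is the Claim_ definition above) =====
theorem parse_to_components_py_spec : Claim_equal_parse_to_components_py := by
  intro args _
  unfold Spec_parse_to_components_py parse_to_components_py parse_to_components_py_alt
  have hnd : (List.foldl pvStepA
      ((PySem.Dict.empty.insert "name" ([] : List String)), "name") args).1.keys.Nodup := by
    apply pvFoldNodup
    exact PySem.Dict.nodup_keys_insert _ _ _ (PySem.Dict.nodup_keys_empty)
  rw [pvComprehension _ hnd]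
  have := pvMain args.length args le_rfl "name" (PySem.Dict.empty : PySem.Dict String (List String))
  rw [show pvMapJoin (PySem.Dict.empty : PySem.Dict String (List String))
        = (PySem.Dict.empty : PySem.Dict String String) by rfl] at this
  rw [this]
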